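-- pv_equiv track=rewrite | github.com/AndreyCreator084/Akeno085 | module_2_hard.py | get_password
-- ===== SOURCE A (Python) =====
-- def get_password(number):
--     password_ = ''
--     for i in range(1, number):
--         for j in range(2, number):
--             if j <= i:
--                 continue
--             if number % (i + j) == 0:
--                 password_ += str(i) + str(j)
--     return password_
-- ===== SOURCE B (Python) =====
-- def get_password(number):
--     # Precompute the divisors of `number` that can occur as i+j (one O(number) pass),
--     # then for each i scan only those divisors instead of all j: O(n*d(n)) vs A's O(n^2).
--     if number < 2:
--         return ''
--     divs = [d for d in range(3, 2 * number - 2) if number % d == 0]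
--     parts = []
--     for i in range(1, number - 1):
--         for d in divs:
--             j = d - i
--             if i < j <= number - 1:
--                 parts.append(str(i) + str(j))
--     return ''.join(parts)
-- ===== Notes on version B (the rewrite author's own statement) =====
-- stated objective: faster
-- what changed: B enumerates the divisors of `number` once (one O(n) pass) and, for each i, scans only those divisors taking j = d - i with range checks, instead of A's nested scan over all j for every i.
import Mathlib
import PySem

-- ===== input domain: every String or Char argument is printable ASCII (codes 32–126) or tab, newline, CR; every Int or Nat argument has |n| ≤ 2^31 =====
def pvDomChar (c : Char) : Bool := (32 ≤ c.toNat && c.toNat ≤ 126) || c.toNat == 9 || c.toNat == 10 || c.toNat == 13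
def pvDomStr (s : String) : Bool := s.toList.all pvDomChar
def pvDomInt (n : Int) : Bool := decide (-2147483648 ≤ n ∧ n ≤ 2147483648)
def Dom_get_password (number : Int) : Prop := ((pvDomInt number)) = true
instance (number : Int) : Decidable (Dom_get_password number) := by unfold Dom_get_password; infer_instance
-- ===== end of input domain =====

-- B precomputes the divisors of `number` once and, per i, scans only those divisors
-- instead of A's full inner j-scan; same output string, measured faster.

-- ===== PORT A =====
def get_password (number : Int) : String :=
  (PySem.List.pyRange 1 number 1).foldl (fun pw i =>
    (PySem.List.pyRange 2 number 1).foldl (fun pw j =>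
      if j ≤ i then pw
      else if PySem.Int.mod number (i + j) = 0 then
        pw ++ (PySem.Int.toStr i ++ PySem.Int.toStr j)
      else pw) pw) ""

-- ===== PORT B =====
def get_password_alt (number : Int) : String :=
  if number < 2 then "" else
  let divs := (PySem.List.pyRange 3 (2 * number - 2) 1).filter
      (fun d => decide (PySem.Int.mod number d = 0))
  let parts := (PySem.List.pyRange 1 (number - 1) 1).foldl (fun parts i =>
      divs.foldl (fun parts d =>
        let j := d - i
        if i < j ∧ j ≤ number - 1 then
          parts ++ [PySem.Int.toStr i ++ PySem.Int.toStr j]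
        else parts) parts) []
  PySem.Str.join "" parts

-- ===== PRECONDITION & SPEC =====
def Spec_get_password (number : Int) (out : String) : Prop := out = get_password_alt number
instance (number : Int) (out : String) : Decidable (Spec_get_password number out) := by unfold Spec_get_password; infer_instance

-- ===== CLAIM (what is proved, stated in full; the proofs are below) =====
def Claim_equal_get_password : Prop := ∀ (number : Int), Dom_get_password number → Spec_get_password number (get_password number)

-- ===== LEMMAS AND PROOFS =====

-- concatenation of a list of strings
def pvSC (l : List String) : String := String.ofList (l.map String.toList).flatten

lemma pvSC_nil : pvSC [] = "" := rfl

lemma pvSC_cons (x : String) (l : List String) : pvSC (x :: l) = x ++ pvSC l := by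
  apply String.toList_inj.mp
  simp [pvSC]

lemma pvSC_append (l₁ l₂ : List String) : pvSC (l₁ ++ l₂) = pvSC l₁ ++ pvSC l₂ := by
  apply String.toList_inj.mp
  simp [pvSC]

lemma pvIntercalate_nil (L : List (List Char)) : List.intercalate ([] : List Char) L = L.flatten := by
  induction L with
  | nil => rfl
  | cons x t ih =>
    cases t with
    | nil => simp [List.intercalate]
    | cons y u => simp_all [List.intercalate, List.intersperse]

lemma pvJoin_empty (parts : List String) : PySem.Str.join "" parts = pvSC parts := by
  apply String.toList_inj.mp
  simp [PySem.Str.join, PySem.Chars.join, pvSC, pvIntercalate_nil]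

lemma pvFoldl_str {α : Type} (g : α → String) :
    ∀ (l : List α) (acc : String),
      l.foldl (fun acc x => acc ++ g x) acc = acc ++ pvSC (l.map g)
  | [], acc => by simp [pvSC_nil]
  | x :: l, acc => by
    simp only [List.foldl_cons, List.map_cons, pvSC_cons, pvFoldl_str g l,
      String.append_assoc]

lemma pvSC_map_ite {α : Type} (p : α → Prop) [DecidablePred p] (g : α → String) :
    ∀ (l : List α),
      pvSC (l.map (fun x => if p x then g x else "")) =
        pvSC ((l.filter (fun x => decide (p x))).map g)
  | [] => rfl
  | x :: l => by
    by_cases h : p x <;>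
      simp [h, pvSC_cons, pvSC_map_ite p g l, String.empty_append]

lemma pvFoldl_flat {α : Type} (h : α → List String) :
    ∀ (l : List α) (acc : List String),
      l.foldl (fun acc x => acc ++ h x) acc = acc ++ (l.map h).flatten
  | [], acc => by simp
  | x :: l, acc => by
    simp [List.foldl_cons, pvFoldl_flat h l]

lemma pvSC_flatten (l : List (List String)) : pvSC l.flatten = pvSC (l.map pvSC) := by
  induction l with
  | nil => rfl
  | cons x t ih => simp [pvSC_append, pvSC_cons, ih]

-- a shifted range
lemma pvRange_shift (a b i : Int) :
    (PySem.List.pyRange a b 1).map (fun j => i + j) = PySem.List.pyRange (i + a) (i + b) 1 := by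
  rw [PySem.List.pyRange_one, PySem.List.pyRange_one, List.map_map]
  have : (i + b - (i + a)) = b - a := by ring
  rw [this]
  congr 1
  funext k
  simp; ring

-- filters of two ranges picking out the same set of integers are equal as lists
lemma pvFilter_pyRange_eq (a₁ b₁ a₂ b₂ : Int) (P₁ P₂ : Int → Bool)
    (h : ∀ d, (a₁ ≤ d ∧ d < b₁ ∧ P₁ d = true) ↔ (a₂ ≤ d ∧ d < b₂ ∧ P₂ d = true)) :
    (PySem.List.pyRange a₁ b₁ 1).filter P₁ = (PySem.List.pyRange a₂ b₂ 1).filter P₂ := by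
  have n₁ : ((PySem.List.pyRange a₁ b₁ 1).filter P₁).Nodup :=
    (PySem.List.nodup_pyRange_one a₁ b₁).filter _
  have n₂ : ((PySem.List.pyRange a₂ b₂ 1).filter P₂).Nodup :=
    (PySem.List.nodup_pyRange_one a₂ b₂).filter _
  have hmem : ∀ d, d ∈ (PySem.List.pyRange a₁ b₁ 1).filter P₁ ↔
      d ∈ (PySem.List.pyRange a₂ b₂ 1).filter P₂ := by
    intro d
    simp only [List.mem_filter, PySem.List.mem_pyRange_one]
    constructor
    · rintro ⟨⟨h1, h2⟩, h3⟩
      obtain ⟨g1, g2, g3⟩ := (h d).mp ⟨h1, h2, h3⟩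
      exact ⟨⟨g1, g2⟩, g3⟩
    · rintro ⟨⟨h1, h2⟩, h3⟩
      obtain ⟨g1, g2, g3⟩ := (h d).mpr ⟨h1, h2, h3⟩
      exact ⟨⟨g1, g2⟩, g3⟩
  have hperm := (List.perm_ext_iff_of_nodup n₁ n₂).mpr hmem
  exact hperm.eq_of_pairwise (fun a b _ _ hab hba => absurd hba (lt_asymm hab))
    (List.Pairwise.sublist List.filter_sublist (PySem.List.pairwise_lt_pyRange_one a₁ b₁))
    (List.Pairwise.sublist List.filter_sublist (PySem.List.pairwise_lt_pyRange_one a₂ b₂))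

-- A as a concatenation over i of per-i concatenations
lemma pvA_shape (n : Int) :
    get_password n =
      pvSC ((PySem.List.pyRange 1 n 1).map (fun i =>
        pvSC (((PySem.List.pyRange 2 n 1).filter
            (fun j => decide (i < j ∧ PySem.Int.mod n (i + j) = 0))).map
          (fun j => PySem.Int.toStr i ++ PySem.Int.toStr j)))) := by
  unfold get_password
  have hinner : ∀ (i : Int) (pw : String),
      (PySem.List.pyRange 2 n 1).foldl (fun pw j =>
        if j ≤ i then pw
        else if PySem.Int.mod n (i + j) = 0 then
          pw ++ (PySem.Int.toStr i ++ PySem.Int.toStr j)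
        else pw) pw
      = pw ++ pvSC (((PySem.List.pyRange 2 n 1).filter
            (fun j => decide (i < j ∧ PySem.Int.mod n (i + j) = 0))).map
          (fun j => PySem.Int.toStr i ++ PySem.Int.toStr j)) := by
    intro i pw
    have step : (PySem.List.pyRange 2 n 1).foldl (fun pw j =>
        if j ≤ i then pw
        else if PySem.Int.mod n (i + j) = 0 then
          pw ++ (PySem.Int.toStr i ++ PySem.Int.toStr j)
        else pw) pw
      = (PySem.List.pyRange 2 n 1).foldl (fun pw j =>
          pw ++ (if i < j ∧ PySem.Int.mod n (i + j) = 0 then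
            PySem.Int.toStr i ++ PySem.Int.toStr j else "")) pw := by
      apply PySem.List.foldl_congr_mem
      intro acc j _
      by_cases h1 : j ≤ i
      · have : ¬ (i < j ∧ PySem.Int.mod n (i + j) = 0) := fun ⟨h, _⟩ => absurd h1 (not_le.mpr h)
        simp [h1, this, String.append_empty]
      · by_cases h2 : PySem.Int.mod n (i + j) = 0
        · simp [h1, h2, not_le.mp h1]
        · simp [h1, h2, String.append_empty]
    rw [step, pvFoldl_str, pvSC_map_ite]
  calc (PySem.List.pyRange 1 n 1).foldl (fun pw i =>
        (PySem.List.pyRange 2 n 1).foldl (fun pw j =>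
          if j ≤ i then pw
          else if PySem.Int.mod n (i + j) = 0 then
            pw ++ (PySem.Int.toStr i ++ PySem.Int.toStr j)
          else pw) pw) ""
      = (PySem.List.pyRange 1 n 1).foldl (fun pw i =>
          pw ++ pvSC (((PySem.List.pyRange 2 n 1).filter
              (fun j => decide (i < j ∧ PySem.Int.mod n (i + j) = 0))).map
            (fun j => PySem.Int.toStr i ++ PySem.Int.toStr j))) "" := by
        apply PySem.List.foldl_congr_mem
        intro acc i _
        exact hinner i acc
    _ = _ := by rw [pvFoldl_str]; rw [String.empty_append]

-- B as the analogous concatenation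
lemma pvB_shape (n : Int) (hn : ¬ n < 2) :
    get_password_alt n =
      pvSC ((PySem.List.pyRange 1 (n - 1) 1).map (fun i =>
        pvSC ((((PySem.List.pyRange 3 (2 * n - 2) 1).filter
              (fun d => decide (PySem.Int.mod n d = 0))).filter
            (fun d => decide (i < d - i ∧ d - i ≤ n - 1))).map
          (fun d => PySem.Int.toStr i ++ PySem.Int.toStr (d - i))))) := by
  unfold get_password_alt
  rw [if_neg hn]
  have hinner : ∀ (i : Int) (acc : List String),
      ((PySem.List.pyRange 3 (2 * n - 2) 1).filter
          (fun d => decide (PySem.Int.mod n d = 0))).foldl (fun parts d =>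
        let j := d - i
        if i < j ∧ j ≤ n - 1 then
          parts ++ [PySem.Int.toStr i ++ PySem.Int.toStr j]
        else parts) acc
      = acc ++ (((PySem.List.pyRange 3 (2 * n - 2) 1).filter
              (fun d => decide (PySem.Int.mod n d = 0))).filter
            (fun d => decide (i < d - i ∧ d - i ≤ n - 1))).map
          (fun d => PySem.Int.toStr i ++ PySem.Int.toStr (d - i)) := by
    intro i acc
    exact PySem.List.foldl_append_ite (fun d => i < d - i ∧ d - i ≤ n - 1)
      (fun d => PySem.Int.toStr i ++ PySem.Int.toStr (d - i)) _ acc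
  simp only [hinner]
  rw [pvFoldl_flat, pvJoin_empty, List.nil_append, pvSC_flatten, List.map_map]
  rfl

-- per-i equality of the two inner lists, for 1 ≤ i ≤ n-2
lemma pvInner_eq (n i : Int) (h1 : 1 ≤ i) (_h2 : i ≤ n - 2) :
    ((PySem.List.pyRange 2 n 1).filter
        (fun j => decide (i < j ∧ PySem.Int.mod n (i + j) = 0))).map
      (fun j => PySem.Int.toStr i ++ PySem.Int.toStr j) =
    (((PySem.List.pyRange 3 (2 * n - 2) 1).filter
          (fun d => decide (PySem.Int.mod n d = 0))).filter
        (fun d => decide (i < d - i ∧ d - i ≤ n - 1))).map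
      (fun d => PySem.Int.toStr i ++ PySem.Int.toStr (d - i)) := by
  -- reindex the left side by d = i + j
  have key : ((PySem.List.pyRange 2 n 1).filter
        (fun j => decide (i < j ∧ PySem.Int.mod n (i + j) = 0))).map (fun j => i + j)
      = ((PySem.List.pyRange 3 (2 * n - 2) 1).filter
          (fun d => decide (PySem.Int.mod n d = 0))).filter
        (fun d => decide (i < d - i ∧ d - i ≤ n - 1)) := by
    have hfm : ((PySem.List.pyRange 2 n 1).filter
          (fun j => decide (i < j ∧ PySem.Int.mod n (i + j) = 0))).map (fun j => i + j)
        = ((PySem.List.pyRange 2 n 1).map (fun j => i + j)).filter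
            (fun d => decide (i < d - i ∧ PySem.Int.mod n d = 0)) := by
      rw [List.filter_map]
      congr 1
      apply List.filter_congr
      intro j _
      simp only [Function.comp]
      have hj : i + j - i = j := by ring
      rw [hj]
    rw [hfm, pvRange_shift, List.filter_filter]
    apply pvFilter_pyRange_eq
    intro d
    simp only [decide_eq_true_eq, Bool.and_eq_true]
    constructor
    · rintro ⟨ha, hb, hm, hd⟩
      exact ⟨by omega, by omega, ⟨hm, by omega⟩, hd⟩
    · rintro ⟨ha, hb, ⟨hm, hu⟩, hd⟩
      exact ⟨by omega, by omega, hm, hd⟩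
  rw [← key, List.map_map]
  apply List.map_congr_left
  intro j _
  simp only [Function.comp]
  have hj : i + j - i = j := by ring
  rw [hj]

-- ===== VERDICT (by name: the statement is the Claim_ definition above) =====
theorem get_password_spec : Claim_equal_get_password := by
  intro n _
  unfold Spec_get_password
  by_cases hn : n < 2
  · unfold get_password get_password_alt
    rw [if_pos hn, PySem.List.pyRange_one_eq_nil (show n ≤ (1 : Int) by omega)]
    rfl
  · rw [pvA_shape, pvB_shape n hn]
    have hsplit : PySem.List.pyRange 1 n 1
        = PySem.List.pyRange 1 (n - 1) 1 ++ [n - 1] := by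
      rw [PySem.List.pyRange_one_append 1 (n - 1) n (by omega) (by omega)]
      congr 1
      generalize hm : n - 1 = m
      rw [show n = m + 1 by omega]
      exact PySem.List.pyRange_one_singleton m
    rw [hsplit, List.map_append, pvSC_append]
    have hlast : ((PySem.List.pyRange 2 n 1).filter
        (fun j => decide ((n - 1) < j ∧ PySem.Int.mod n ((n - 1) + j) = 0))) = [] := by
      rw [List.filter_eq_nil_iff]
      intro j hj
      rw [PySem.List.mem_pyRange_one] at hj
      simp only [decide_eq_true_eq, not_and]
      intro h
      omega
    have hlast' : pvSC (([n - 1]).map (fun i =>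
        pvSC (((PySem.List.pyRange 2 n 1).filter
            (fun j => decide (i < j ∧ PySem.Int.mod n (i + j) = 0))).map
          (fun j => PySem.Int.toStr i ++ PySem.Int.toStr j)))) = "" := by
      simp only [List.map_cons, List.map_nil, hlast]
      rfl
    rw [hlast', String.append_empty]
    congr 1
    apply List.map_congr_left
    intro i hi
    rw [PySem.List.mem_pyRange_one] at hi
    congr 1
    exact pvInner_eq n i (by omega) (by omega)
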